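-- pv_equiv track=rewrite | github.com/Sivvak/V-Eureka | ksim_eureka/ksim_env/result_parsing.py | filter_traceback
-- ===== SOURCE A (Python) =====
-- def filter_traceback(stdout_str):
--     """Filter and extract relevant error information from stdout."""
--
--     # TODO: possibly needs adjustments
--
--     lines = stdout_str.split("\n")
--     error_lines = []
--
--     for line in lines:
--         if any(
--             keyword in line.lower()
--             for keyword in ["error", "exception", "traceback", "failed"]
--         ):
--             error_lines.append(line.strip())
--
--     if error_lines:
--         return "\n".join(error_lines[-10:])  # Return last 10 error lines
--     return ""
-- ===== SOURCE B (Python) =====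
-- def filter_traceback(stdout_str):
--     """Filter and extract relevant error information from stdout."""
--     keywords = ("error", "exception", "traceback", "failed")
--     buf = []
--     for line in reversed(stdout_str.split("\n")):
--         low = line.lower()
--         if any(keyword in low for keyword in keywords):
--             buf.append(line.strip())
--             if len(buf) == 10:
--                 break
--     if buf:
--         return "\n".join(reversed(buf))
--     return ""
-- ===== Notes on version B (the rewrite author's own statement) =====
-- stated objective: alternative
-- what changed: B scans the lines in reverse with a bounded 10-entry buffer and breaks as soon as 10 matches are collected, then reverses the buffer, instead of collecting every matching line and slicing the last 10.
import Mathlib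
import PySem

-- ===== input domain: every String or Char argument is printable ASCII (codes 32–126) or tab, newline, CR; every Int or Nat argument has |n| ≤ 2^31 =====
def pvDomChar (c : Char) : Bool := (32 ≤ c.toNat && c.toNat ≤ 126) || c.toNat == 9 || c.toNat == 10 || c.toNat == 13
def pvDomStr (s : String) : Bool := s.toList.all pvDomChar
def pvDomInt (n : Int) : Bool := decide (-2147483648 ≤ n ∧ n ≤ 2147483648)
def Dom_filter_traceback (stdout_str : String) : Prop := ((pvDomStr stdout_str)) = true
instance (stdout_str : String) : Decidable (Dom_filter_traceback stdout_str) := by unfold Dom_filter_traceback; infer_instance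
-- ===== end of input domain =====

-- B scans the lines in reverse with a bounded 10-entry buffer and breaks early; alternative decomposition, same result.


-- ===== PORT A =====
-- 'if any(keyword in line.lower() for keyword in [...])'
def pvAMatch (line : List Char) : Bool :=
  ["error", "exception", "traceback", "failed"].any
    (fun keyword => PySem.Chars.isIn keyword.toList (PySem.Chars.lower line))

def filter_traceback (stdout_str : String) : String :=
  let lines := PySem.Chars.splitOn stdout_str.toList ['\n']
  let error_lines := lines.foldl
    (fun acc line => if pvAMatch line then acc ++ [PySem.Chars.strip line] else acc) []
  if error_lines ≠ [] then
    String.ofList (PySem.Chars.join ['\n'] (PySem.List.slice error_lines (some (-10)) none))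
  else ""

-- ===== PORT B =====
-- B's loop body: low = line.lower(); any(keyword in low ...)
def pvBMatch (line : List Char) : Bool :=
  let low := PySem.Chars.lower line
  ["error", "exception", "traceback", "failed"].any (fun keyword => PySem.Chars.isIn keyword.toList low)

-- reverse scan appending to buf, break once len(buf) == 10
def pvBScan : List (List Char) → List (List Char) → List (List Char)
  | [], buf => buf
  | line :: rest, buf =>
    if pvBMatch line then
      let buf' := buf ++ [PySem.Chars.strip line]
      if buf'.length = 10 then buf' else pvBScan rest buf'
    else pvBScan rest buf

def filter_traceback_alt (stdout_str : String) : String :=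
  let buf := pvBScan (PySem.Chars.splitOn stdout_str.toList ['\n']).reverse []
  if buf ≠ [] then String.ofList (PySem.Chars.join ['\n'] buf.reverse) else ""

-- ===== PRECONDITION & SPEC =====
def Spec_filter_traceback (stdout_str : String) (out : String) : Prop := out = filter_traceback_alt stdout_str
instance (stdout_str : String) (out : String) : Decidable (Spec_filter_traceback stdout_str out) := by unfold Spec_filter_traceback; infer_instance

-- ===== CLAIM (what is proved, stated in full; the proofs are below) =====
def Claim_equal_filter_traceback : Prop := ∀ (stdout_str : String), Dom_filter_traceback stdout_str → Spec_filter_traceback stdout_str (filter_traceback stdout_str)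

-- ===== LEMMAS AND PROOFS =====

theorem pvBScan_eq (xs buf : List (List Char)) (h : buf.length < 10) :
    pvBScan xs buf = buf ++ ((xs.filter pvBMatch).map PySem.Chars.strip).take (10 - buf.length) := by
  induction xs generalizing buf with
  | nil => simp [pvBScan]
  | cons line rest ih =>
    by_cases hm : pvBMatch line
    · simp only [pvBScan, hm, if_true, List.filter_cons, List.map_cons]
      by_cases h10 : (buf ++ [PySem.Chars.strip line]).length = 10
      · simp only [h10, if_true]
        have : 10 - buf.length = 1 := by simp at h10; omega
        simp [this]
      · simp only [h10, if_false]
        rw [ih _ (by simp at h10 ⊢; omega)]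
        have : 10 - buf.length = (10 - (buf ++ [PySem.Chars.strip line]).length) + 1 := by
          simp; omega
        simp [this, List.take_succ_cons]
    · simp [pvBScan, hm, ih _ h]

theorem match_eq : pvAMatch = pvBMatch := rfl

theorem filter_traceback_eq_alt (s : String) : filter_traceback s = filter_traceback_alt s := by
  unfold filter_traceback filter_traceback_alt
  generalize PySem.Chars.splitOn s.toList ['\n'] = L
  dsimp only
  have hfold := PySem.List.foldl_append_if pvAMatch PySem.Chars.strip L []
  rw [List.nil_append] at hfold
  rw [hfold, match_eq]
  set el := (L.filter pvBMatch).map PySem.Chars.strip with hel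
  have hscan : pvBScan L.reverse [] = (el.reverse).take 10 := by
    rw [pvBScan_eq _ _ (by simp)]
    simp [hel, List.filter_reverse, List.map_reverse]
  rw [hscan]
  have hslice : PySem.List.slice el (some (-10)) none = el.drop (el.length - 10) := by
    rw [PySem.List.slice_from_neg_ofNat el 10 (by omega)]
  have hrev : (el.reverse.take 10).reverse = el.drop (el.length - 10) := by
    rw [List.take_reverse, List.reverse_reverse]
  by_cases he : el = []
  · simp [he]
  · have hne : el.reverse.take 10 ≠ [] := by
      simp [List.take_eq_nil_iff, he]
    rw [if_pos he, if_pos hne, hslice, hrev]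

-- ===== VERDICT (by name: the statement is the Claim_ definition above) =====
theorem filter_traceback_spec : Claim_equal_filter_traceback := by
  intro s _
  exact filter_traceback_eq_alt s
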